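-- pv_equiv track=rewrite | github.com/luke-glaser7/gofirstdice | Dice/exhaustive palindromes 5 perm check.py | is_counts_equal
-- ===== SOURCE A (Python) =====
-- def is_counts_equal(alphabetic_string):
--     count = {"" : 1}
--     first_count = None  # track the first count encountered
--
--     for c in alphabetic_string:
--         keys = list(count.keys())  # Create a copy of the keys
--         for k in keys:
--             if k.count(c) == 0:
--                 k2 = k + c
--                 count[k2] = count.get(k2, 0) + count[k]
--
--     for k, v in count.items():
--         if len(k) == 5:
--             if first_count is None:
--                 first_count = v
--             elif first_count != v:
--                 return False
--     return True
-- ===== SOURCE B (Python) =====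
-- def is_counts_equal(alphabetic_string):
--     # distinct characters in first-occurrence order
--     distinct = []
--     for ch in alphabetic_string:
--         if ch not in distinct:
--             distinct.append(ch)
--
--     def count_subseq(target):
--         # dp[i] = number of subsequences of the scanned prefix equal to target[:i]
--         dp = [1] + [0] * len(target)
--         for ch in alphabetic_string:
--             dp = [dp[0]] + [cur + (prev if tc == ch else 0)
--                             for prev, cur, tc in zip(dp, dp[1:], target)]
--         return dp[len(target)]
--
--     def perms(avail, k):
--         if k == 0:
--             return [[]]
--         return [[avail[i]] + rest
--                 for i in range(len(avail))
--                 for rest in perms(avail[:i] + avail[i + 1:], k - 1)]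
--
--     first = None
--     for t in perms(distinct, 5):
--         n = count_subseq(t)
--         if n <= 0:
--             continue
--         if first is None:
--             first = n
--         elif n != first:
--             return False
--     return True
-- ===== Notes on version B (the rewrite author's own statement) =====
-- stated objective: faster
-- what changed: A grows a dict holding every distinct-character subsequence of every length and then scans its length-5 entries; B instead enumerates the 5-permutations of the distinct characters, counts each candidate's occurrences as a subsequence with a per-target prefix-DP scan of the string, and compares the positive counts with an early exit on the first mismatch.
import Mathlib
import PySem

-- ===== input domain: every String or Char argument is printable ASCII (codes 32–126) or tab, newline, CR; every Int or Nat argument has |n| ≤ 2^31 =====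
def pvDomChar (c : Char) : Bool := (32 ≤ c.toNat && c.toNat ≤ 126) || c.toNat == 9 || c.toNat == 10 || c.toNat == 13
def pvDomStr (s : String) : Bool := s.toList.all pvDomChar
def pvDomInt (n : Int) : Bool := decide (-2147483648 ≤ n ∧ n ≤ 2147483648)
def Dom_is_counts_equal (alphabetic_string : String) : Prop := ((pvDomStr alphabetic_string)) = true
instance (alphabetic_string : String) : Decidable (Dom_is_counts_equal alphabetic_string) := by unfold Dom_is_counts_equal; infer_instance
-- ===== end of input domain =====

-- B replaces A's dict of ALL distinct-char subsequences by a per-target subsequence-count DP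
-- over the 5-permutations of the distinct characters (alternative algorithm; exact same value).

-- ===== PORT A =====
-- Port of A; Python str values (the dict keys and the iterated characters) are handled as
-- their lists of code points (exact: Lean String ↔ List Char).
def aInner (c : Char) (d0 : PySem.Dict (List Char) Int) : PySem.Dict (List Char) Int :=
  (PySem.Dict.keys d0).foldl (fun d k =>
    if k.count c = 0 then
      PySem.Dict.insert d (k ++ [c]) (PySem.Dict.getD d (k ++ [c]) 0 + PySem.Dict.getD d k 0)
    else d) d0

def aCheck : List (List Char × Int) → Option Int → Bool
  | [], _ => true
  | (k, v) :: rest, fc =>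
    if k.length = 5 then
      match fc with
      | none => aCheck rest (some v)
      | some f => if f ≠ v then false else aCheck rest (some f)
    else aCheck rest fc

def is_counts_equal (alphabetic_string : String) : Bool :=
  let d := alphabetic_string.toList.foldl (fun d c => aInner c d)
             (PySem.Dict.insert PySem.Dict.empty [] 1)
  aCheck (PySem.Dict.items d) none

-- ===== PORT B =====
def bDistinct (s : List Char) : List Char :=
  s.foldl (fun acc ch => if ch ∈ acc then acc else acc ++ [ch]) []

def bStep (target : List Char) (ch : Char) (dp : List Int) : List Int :=
  dp.headI :: List.zipWith3 (fun prev cur tc => cur + if tc = ch then prev else 0) dp dp.tail target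

def bCount (s : List Char) (target : List Char) : Int :=
  let dp := s.foldl (fun dp ch => bStep target ch dp) (1 :: List.replicate target.length 0)
  PySem.List.pyGetD dp (target.length : Int) 0

def bPerms : Nat → List Char → List (List Char)
  | 0, _ => [[]]
  | k + 1, avail =>
    (List.range avail.length).flatMap (fun i =>
      (bPerms k (avail.take i ++ avail.drop (i + 1))).map (fun rest => avail.getD i default :: rest))

def bLoop (s : List Char) : List (List Char) → Option Int → Bool
  | [], _ => true
  | t :: rest, first =>
    let n := bCount s t
    if n ≤ 0 then bLoop s rest first
    else
      match first with
      | none => bLoop s rest (some n)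
      | some f => if n ≠ f then false else bLoop s rest (some f)

def is_counts_equal_alt (alphabetic_string : String) : Bool :=
  let distinct := bDistinct alphabetic_string.toList
  bLoop alphabetic_string.toList (bPerms 5 distinct) none

-- ===== PRECONDITION & SPEC =====
def Spec_is_counts_equal (alphabetic_string : String) (out : Bool) : Prop := out = is_counts_equal_alt alphabetic_string
instance (alphabetic_string : String) (out : Bool) : Decidable (Spec_is_counts_equal alphabetic_string out) := by unfold Spec_is_counts_equal; infer_instance

-- ===== CLAIM (what is proved, stated in full; the proofs are below) =====
def Claim_equal_is_counts_equal : Prop := ∀ (alphabetic_string : String), Dom_is_counts_equal alphabetic_string → Spec_is_counts_equal alphabetic_string (is_counts_equal alphabetic_string)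

-- ===== LEMMAS AND PROOFS =====
-- numSub s t = number of subsequences of s equal to t (the common characterization both
-- programs are proved against).
def numSub : List Char → List Char → Int
  | [], [] => 1
  | [], _ :: _ => 0
  | _ :: _, [] => 1
  | c :: s, d :: t => numSub s (d :: t) + if c = d then numSub s t else 0

theorem numSub_nil_right (s : List Char) : numSub s [] = 1 := by
  cases s <;> simp [numSub]

theorem numSub_nonneg (s t : List Char) : 0 ≤ numSub s t := by
  induction s generalizing t with
  | nil => cases t <;> simp [numSub]
  | cons c s ih =>
    cases t with
    | nil => simp [numSub]
    | cons d t' =>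
      have h1 := ih (d :: t')
      have h2 := ih t'
      simp only [numSub]
      split <;> omega

theorem numSub_append (p : List Char) (c : Char) (m : List Char) :
    numSub (p ++ [c]) m
      = numSub p m + (if m.getLast? = some c then numSub p m.dropLast else 0) := by
  induction p generalizing m with
  | nil =>
    match m with
    | [] => simp [numSub]
    | [d] => by_cases h : d = c <;> simp [numSub, h, eq_comm]
    | d :: e :: t =>
      simp only [List.nil_append, numSub, List.getLast?_cons_cons]
      have h1 : numSub [] ((d :: e :: t).dropLast) = 0 := by
        rw [List.dropLast_cons₂]; simp [numSub]
      rw [h1]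
      simp [numSub]
  | cons a p ih =>
    match m with
    | [] => simp [numSub_nil_right]
    | d :: t =>
      simp only [List.cons_append, numSub, ih]
      cases t with
      | nil =>
        by_cases h1 : d = c <;> by_cases h2 : a = d <;>
          simp [h1, h2, numSub_nil_right, numSub] <;> omega
      | cons e t' =>
        simp only [List.getLast?_cons_cons, List.dropLast_cons₂]
        by_cases h1 : (e :: t').getLast? = some c <;> by_cases h2 : a = d <;>
          simp [h1, h2, numSub] <;> ring

def updBy (c : Char) (P : List (List Char)) (m : List Char) : Bool :=
  (m.getLast? == some c) && P.contains m.dropLast && (m.dropLast.count c == 0)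

theorem updBy_iff (c : Char) (P : List (List Char)) (m : List Char) :
    updBy c P m = true ↔ m.getLast? = some c ∧ m.dropLast ∈ P ∧ m.dropLast.count c = 0 := by
  simp [updBy, and_assoc]

theorem eq_concat_of_getLast? {m : List Char} {c : Char} (h : m.getLast? = some c) :
    m = m.dropLast ++ [c] := by
  have hne : m ≠ [] := by rintro rfl; simp at h
  conv_lhs => rw [← List.dropLast_concat_getLast hne]
  rw [List.getLast?_eq_some_getLast hne] at h
  simp at h
  rw [h]

theorem aInner_fold_get? (c : Char) (D : PySem.Dict (List Char) Int)
    (L P : List (List Char)) (hK : PySem.Dict.keys D = P ++ L)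
    (hnd : (PySem.Dict.keys D).Nodup)
    (d : PySem.Dict (List Char) Int)
    (hd : ∀ m, PySem.Dict.get? d m =
      if updBy c P m then some (PySem.Dict.getD D m 0 + PySem.Dict.getD D m.dropLast 0)
      else PySem.Dict.get? D m) :
    ∀ m, PySem.Dict.get? (L.foldl (fun d k =>
      if k.count c = 0 then
        PySem.Dict.insert d (k ++ [c]) (PySem.Dict.getD d (k ++ [c]) 0 + PySem.Dict.getD d k 0)
      else d) d) m =
      if updBy c (P ++ L) m then some (PySem.Dict.getD D m 0 + PySem.Dict.getD D m.dropLast 0)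
      else PySem.Dict.get? D m := by
  induction L generalizing P d with
  | nil => simpa using hd
  | cons k L ih =>
    intro m
    have hK' : PySem.Dict.keys D = (P ++ [k]) ++ L := by simp [hK]
    have hknotP : k ∉ P := by
      have h2 := hK ▸ hnd
      rw [List.nodup_append] at h2
      intro hmem
      exact h2.2.2 k hmem k (by simp) rfl
    have hPcons : (P ++ [k]) ++ L = P ++ k :: L := by simp
    by_cases hc : k.count c = 0
    · -- insert case
      have hnupdk : updBy c P k = false := by
        rw [Bool.eq_false_iff]
        intro h
        rw [updBy_iff] at h
        have : c ∈ k := List.mem_of_getLast? h.1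
        rw [List.count_eq_zero] at hc
        exact hc this
      have hnupdk2 : updBy c P (k ++ [c]) = false := by
        rw [Bool.eq_false_iff]
        intro h
        rw [updBy_iff] at h
        rw [List.dropLast_concat] at h
        exact hknotP h.2.1
      have hreadk : PySem.Dict.getD d k 0 = PySem.Dict.getD D k 0 := by
        rw [PySem.Dict.getD_eq_get?_getD, PySem.Dict.getD_eq_get?_getD, hd k, hnupdk]
        simp
      have hreadk2 : PySem.Dict.getD d (k ++ [c]) 0 = PySem.Dict.getD D (k ++ [c]) 0 := by
        rw [PySem.Dict.getD_eq_get?_getD, PySem.Dict.getD_eq_get?_getD, hd (k ++ [c]), hnupdk2]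
        simp
      simp only [List.foldl_cons, if_pos hc]
      rw [ih (P ++ [k]) hK' _ ?_ m, hPcons]
      intro m'
      rw [PySem.Dict.get?_insert]
      by_cases hm : m' = k ++ [c]
      · subst hm
        have : updBy c (P ++ [k]) (k ++ [c]) = true := by
          rw [updBy_iff, List.dropLast_concat]
          exact ⟨by simp, by simp, hc⟩
        rw [if_pos rfl, this, if_pos rfl, List.dropLast_concat, hreadk, hreadk2]
      · rw [if_neg hm, hd m']
        have : updBy c (P ++ [k]) m' = updBy c P m' := by
          by_cases hlast : m'.getLast? = some c
          · have hne : m'.dropLast ≠ k := by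
              intro hdl
              exact hm (by rw [eq_concat_of_getLast? hlast, hdl])
            simp [updBy, hlast, hne]
          · simp only [updBy]
            rw [Bool.eq_iff_iff]
            simp [hlast]
        rw [this]
    · -- skip case
      simp only [List.foldl_cons, if_neg hc]
      rw [ih (P ++ [k]) hK' d ?_ m, hPcons]
      intro m'
      rw [hd m']
      have : updBy c (P ++ [k]) m' = updBy c P m' := by
        by_cases hdl : m'.dropLast = k
        · have : (m'.dropLast.count c == 0) = false := by
            simp [hdl]; omega
          simp [updBy, this]
        · simp [updBy, hdl]
      rw [this]

def dictOK (p : List Char) (D : PySem.Dict (List Char) Int) : Prop :=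
  (PySem.Dict.keys D).Nodup ∧
  ∀ m, PySem.Dict.get? D m =
    if m.Nodup ∧ 0 < numSub p m then some (numSub p m) else none

theorem getD_of_dictOK {p : List Char} {D : PySem.Dict (List Char) Int}
    (h : dictOK p D) {m : List Char} (hm : m.Nodup) :
    PySem.Dict.getD D m 0 = numSub p m := by
  rw [PySem.Dict.getD_eq_get?_getD, h.2 m]
  by_cases hp : 0 < numSub p m
  · simp [hm, hp]
  · have := numSub_nonneg p m
    simp [hp]
    omega

theorem aInner_keys_nodup (c : Char) (D : PySem.Dict (List Char) Int)
    (h : (PySem.Dict.keys D).Nodup) : (PySem.Dict.keys (aInner c D)).Nodup := by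
  unfold aInner
  generalize PySem.Dict.keys D = L
  induction L generalizing D with
  | nil => exact h
  | cons k L ih =>
    simp only [List.foldl_cons]
    split
    · exact ih _ (PySem.Dict.nodup_keys_insert _ _ _ h)
    · exact ih _ h

theorem dictOK_step (p : List Char) (c : Char) (D : PySem.Dict (List Char) Int)
    (h : dictOK p D) : dictOK (p ++ [c]) (aInner c D) := by
  obtain ⟨hnd, H⟩ := h
  refine ⟨aInner_keys_nodup c D hnd, ?_⟩
  intro m
  have hfold := aInner_fold_get? c D (PySem.Dict.keys D) [] (by simp) hnd D
      (by intro m'; rw [if_neg (by simp [updBy])]) m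
  rw [show (([] : List (List Char)) ++ PySem.Dict.keys D) = PySem.Dict.keys D from rfl] at hfold
  unfold aInner
  rw [hfold]
  by_cases hupd : updBy c (PySem.Dict.keys D) m = true
  · rw [if_pos hupd]
    rw [updBy_iff] at hupd
    obtain ⟨h1, h2, h3⟩ := hupd
    have hdl : m.dropLast.Nodup ∧ 0 < numSub p m.dropLast := by
      by_contra hcon
      have h0 := H m.dropLast
      rw [if_neg hcon, PySem.Dict.get?_eq_none_iff_not_mem_keys] at h0
      exact h0 h2
    have hcnot : c ∉ m.dropLast := by rw [← List.count_eq_zero]; exact h3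
    have hmnd : m.Nodup := by
      rw [eq_concat_of_getLast? h1]
      simp [List.nodup_append, hdl.1]
      exact fun a ha hac => hcnot (hac ▸ ha)
    have hval : numSub (p ++ [c]) m = numSub p m + numSub p m.dropLast := by
      rw [numSub_append, if_pos h1]
    have hpos : 0 < numSub (p ++ [c]) m := by
      have := numSub_nonneg p m
      omega
    rw [if_pos ⟨hmnd, hpos⟩, getD_of_dictOK ⟨hnd, H⟩ hmnd, getD_of_dictOK ⟨hnd, H⟩ hdl.1, hval]
  · rw [if_neg hupd, H m]
    by_cases hmnd : m.Nodup
    · have hsame : numSub (p ++ [c]) m = numSub p m := by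
        rw [numSub_append]
        by_cases h1 : m.getLast? = some c
        · rw [if_pos h1]
          rw [updBy_iff] at hupd
          push Not at hupd
          have hcnot : c ∉ m.dropLast := by
            intro hc
            rw [eq_concat_of_getLast? h1] at hmnd
            rw [List.nodup_append] at hmnd
            exact hmnd.2.2 c hc c (by simp) rfl
          have h3 : m.dropLast.count c = 0 := by rw [List.count_eq_zero]; exact hcnot
          have h2 : m.dropLast ∉ PySem.Dict.keys D := fun hmem => (hupd h1 hmem) h3
          have h0 := H m.dropLast
          rw [← PySem.Dict.get?_eq_none_iff_not_mem_keys] at h2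
          rw [h2] at h0
          have hnd2 : m.dropLast.Nodup := by
            rw [eq_concat_of_getLast? h1] at hmnd
            exact (List.nodup_append.mp hmnd).1
          have hnp : ¬ (m.dropLast.Nodup ∧ 0 < numSub p m.dropLast) := by
            intro hx
            rw [if_pos hx] at h0
            simp at h0
          have hz : numSub p m.dropLast = 0 := by
            have := numSub_nonneg p m.dropLast
            have : ¬ 0 < numSub p m.dropLast := fun hp => hnp ⟨hnd2, hp⟩
            omega
          omega
        · rw [if_neg h1, add_zero]
      rw [hsame]
    · simp [hmnd]

theorem dictOK_final (s : List Char) :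
    dictOK s (s.foldl (fun d c => aInner c d) (PySem.Dict.insert PySem.Dict.empty [] 1)) := by
  induction s using List.reverseRecOn with
  | nil =>
    refine ⟨?_, ?_⟩
    · exact PySem.Dict.nodup_keys_insert _ _ _ (by simp)
    · intro m
      rw [List.foldl_nil, PySem.Dict.get?_insert]
      cases m with
      | nil => simp [numSub]
      | cons d t => simp [numSub]
  | append_singleton p c ih =>
    rw [List.foldl_append]
    exact dictOK_step p c _ ih

theorem aCheck_some (l : List (List Char × Int)) (f : Int) :
    aCheck l (some f) = true ↔ ∀ kv ∈ l, kv.1.length = 5 → kv.2 = f := by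
  induction l with
  | nil => simp [aCheck]
  | cons kv rest ih =>
    obtain ⟨k, v⟩ := kv
    by_cases h5 : k.length = 5
    · simp only [aCheck, if_pos h5]
      by_cases hv : f = v
      · subst hv
        rw [if_neg (by simp), ih]
        constructor
        · intro h kv hkv h5'
          rcases List.mem_cons.mp hkv with rfl | hkv'
          · rfl
          · exact h kv hkv' h5'
        · intro h kv hkv h5'
          exact h kv (List.mem_cons_of_mem _ hkv) h5'
      · simp only [ne_eq, hv, not_false_iff, if_pos]
        constructor
        · intro h; exact absurd h (by simp)
        · intro h
          exact absurd (h (k, v) (by simp) h5).symm hv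
    · simp only [aCheck, if_neg h5]
      rw [ih]
      constructor
      · intro h kv hkv h5'
        rcases List.mem_cons.mp hkv with rfl | hkv'
        · exact absurd h5' h5
        · exact h kv hkv' h5'
      · intro h kv hkv h5'
        exact h kv (List.mem_cons_of_mem _ hkv) h5'

theorem aCheck_none (l : List (List Char × Int)) :
    aCheck l none = true ↔
      ∀ kv ∈ l, ∀ kv' ∈ l, kv.1.length = 5 → kv'.1.length = 5 → kv.2 = kv'.2 := by
  induction l with
  | nil => simp [aCheck]
  | cons kv rest ih =>
    obtain ⟨k, v⟩ := kv
    by_cases h5 : k.length = 5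
    · simp only [aCheck, if_pos h5]
      rw [aCheck_some]
      constructor
      · intro h kv1 h1 kv2 h2 h51 h52
        rcases List.mem_cons.mp h1 with rfl | h1' <;> rcases List.mem_cons.mp h2 with rfl | h2'
        · rfl
        · exact (h kv2 h2' h52).symm
        · exact h kv1 h1' h51
        · exact (h kv1 h1' h51).trans (h kv2 h2' h52).symm
      · intro h kv1 h1 h51
        exact h kv1 (List.mem_cons_of_mem _ h1) (k, v) (by simp) h51 h5
    · simp only [aCheck, if_neg h5]
      rw [ih]
      constructor
      · intro h kv1 h1 kv2 h2 h51 h52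
        rcases List.mem_cons.mp h1 with rfl | h1'
        · exact absurd h51 h5
        rcases List.mem_cons.mp h2 with rfl | h2'
        · exact absurd h52 h5
        exact h kv1 h1' kv2 h2' h51 h52
      · intro h kv1 h1 kv2 h2 h51 h52
        exact h kv1 (List.mem_cons_of_mem _ h1) kv2 (List.mem_cons_of_mem _ h2) h51 h52

theorem bDistinct_aux (s acc : List Char) (hacc : acc.Nodup) :
    (s.foldl (fun acc ch => if ch ∈ acc then acc else acc ++ [ch]) acc).Nodup ∧
    ∀ x, x ∈ s.foldl (fun acc ch => if ch ∈ acc then acc else acc ++ [ch]) acc ↔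
      x ∈ acc ∨ x ∈ s := by
  induction s generalizing acc with
  | nil => simp [hacc]
  | cons c s ih =>
    simp only [List.foldl_cons]
    by_cases hc : c ∈ acc
    · rw [if_pos hc]
      obtain ⟨h1, h2⟩ := ih acc hacc
      refine ⟨h1, fun x => ?_⟩
      rw [h2 x]
      constructor
      · rintro (h | h)
        · exact Or.inl h
        · exact Or.inr (List.mem_cons_of_mem _ h)
      · rintro (h | h)
        · exact Or.inl h
        · rcases List.mem_cons.mp h with rfl | h'
          · exact Or.inl hc
          · exact Or.inr h'
    · rw [if_neg hc]
      obtain ⟨h1, h2⟩ := ih (acc ++ [c]) (by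
        simp [List.nodup_append, hacc]
        exact fun a ha hac => hc (hac ▸ ha))
      refine ⟨h1, fun x => ?_⟩
      rw [h2 x]
      simp only [List.mem_append, List.mem_cons]
      tauto

theorem bDistinct_nodup (s : List Char) : (bDistinct s).Nodup :=
  (bDistinct_aux s [] (by simp)).1

theorem mem_bDistinct (s : List Char) (x : Char) : x ∈ bDistinct s ↔ x ∈ s := by
  rw [bDistinct, (bDistinct_aux s [] (by simp)).2 x]
  simp

theorem numSub_mem (s t : List Char) (h : 0 < numSub s t) : ∀ x ∈ t, x ∈ s := by
  induction s generalizing t with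
  | nil =>
    cases t with
    | nil => simp
    | cons d t' => simp [numSub] at h
  | cons c s ih =>
    cases t with
    | nil => simp
    | cons d t' =>
      intro x hx
      simp only [numSub] at h
      have hn1 := numSub_nonneg s (d :: t')
      have hn2 := numSub_nonneg s t'
      by_cases hp : 0 < numSub s (d :: t')
      · exact List.mem_cons_of_mem _ (ih (d :: t') hp x hx)
      · have hcd : c = d ∧ 0 < numSub s t' := by
          by_cases hc : c = d
          · refine ⟨hc, ?_⟩; rw [if_pos hc] at h; omega
          · rw [if_neg hc] at h; omega
        rcases List.mem_cons.mp hx with rfl | hx'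
        · simp [hcd.1]
        · exact List.mem_cons_of_mem _ (ih t' hcd.2 x hx')

theorem bFold_inv (t0 t1 t2 t3 t4 : Char) (s : List Char) :
    s.foldl (fun dp ch => bStep [t0, t1, t2, t3, t4] ch dp) [1, 0, 0, 0, 0, 0] =
      [numSub s [], numSub s [t0], numSub s [t0, t1], numSub s [t0, t1, t2],
       numSub s [t0, t1, t2, t3], numSub s [t0, t1, t2, t3, t4]] := by
  induction s using List.reverseRecOn with
  | nil => simp [numSub]
  | append_singleton p c ih =>
    rw [List.foldl_append, List.foldl_cons, List.foldl_nil, ih]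
    simp only [bStep, List.zipWith3, List.headI, List.tail_cons]
    simp [numSub_append, numSub_nil_right]

theorem bCount_eq (s t : List Char) (ht : t.length = 5) : bCount s t = numSub s t := by
  match t, ht with
  | [t0, t1, t2, t3, t4], _ =>
    unfold bCount
    rw [show ([t0,t1,t2,t3,t4].length) = 5 from rfl]
    simp only [List.replicate]
    rw [bFold_inv]
    rw [show ((5 : Nat) : Int) = ((5 : Nat) : Int) from rfl, PySem.List.pyGetD_natCast]
    rfl

theorem mem_bPerms (k : Nat) (avail t : List Char) (hav : avail.Nodup) :
    t ∈ bPerms k avail ↔ t.length = k ∧ t.Nodup ∧ ∀ x ∈ t, x ∈ avail := by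
  induction k generalizing avail t with
  | zero =>
    simp only [bPerms, List.mem_singleton]
    constructor
    · rintro rfl; simp
    · rintro ⟨hlen, -, -⟩
      exact List.eq_nil_of_length_eq_zero hlen
  | succ k ih =>
    simp only [bPerms, List.mem_flatMap, List.mem_map, List.mem_range]
    constructor
    · rintro ⟨i, hi, rest, hrest, rfl⟩
      rw [List.getD_eq_getElem avail default hi]
      rw [← List.eraseIdx_eq_take_drop_succ] at hrest
      have hnd' : (avail.eraseIdx i).Nodup := List.Nodup.eraseIdx i hav
      obtain ⟨hlen, hnd, hsub⟩ := (ih (avail.eraseIdx i) rest hnd').mp hrest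
      have hhead : avail[i] ∉ rest := by
        intro hmem
        have := hsub _ hmem
        rw [← List.Nodup.erase_getElem hav i hi] at this
        exact (List.Nodup.not_mem_erase hav) this
      refine ⟨by simp [hlen], List.nodup_cons.mpr ⟨hhead, hnd⟩, ?_⟩
      intro x hx
      rcases List.mem_cons.mp hx with rfl | hx'
      · exact List.getElem_mem hi
      · exact List.mem_of_mem_eraseIdx (hsub x hx')
    · rintro ⟨hlen, hnd, hsub⟩
      match t, hlen with
      | x :: rest, hlen =>
        have hx : x ∈ avail := hsub x (by simp)
        have hi : avail.idxOf x < avail.length := List.idxOf_lt_length_of_mem hx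
        refine ⟨avail.idxOf x, hi, rest, ?_, ?_⟩
        · rw [← List.eraseIdx_eq_take_drop_succ, List.eraseIdx_idxOf_eq_erase]
          apply (ih (avail.erase x) rest (List.Nodup.erase x hav)).mpr
          refine ⟨by simpa using hlen, (List.nodup_cons.mp hnd).2, ?_⟩
          intro y hy
          have hyne : y ≠ x := fun h => (List.nodup_cons.mp hnd).1 (h ▸ hy)
          exact (List.mem_erase_of_ne hyne).mpr (hsub y (List.mem_cons_of_mem _ hy))
        · rw [List.getD_eq_getElem avail default hi, List.getElem_idxOf hi]

theorem bLoop_some (s : List Char) (l : List (List Char)) (f : Int) :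
    bLoop s l (some f) = true ↔ ∀ t ∈ l, 0 < bCount s t → bCount s t = f := by
  induction l with
  | nil => simp [bLoop]
  | cons t rest ih =>
    by_cases hp : bCount s t ≤ 0
    · simp only [bLoop, if_pos hp]
      rw [ih]
      constructor
      · intro h t' ht' hp'
        rcases List.mem_cons.mp ht' with rfl | ht''
        · omega
        · exact h t' ht'' hp'
      · intro h t' ht' hp'
        exact h t' (List.mem_cons_of_mem _ ht') hp'
    · simp only [bLoop, if_neg hp]
      by_cases hv : bCount s t = f
      · rw [if_neg (by simp [hv]), ih]
        constructor
        · intro h t' ht' hp'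
          rcases List.mem_cons.mp ht' with rfl | ht''
          · exact hv
          · exact h t' ht'' hp'
        · intro h t' ht' hp'
          exact h t' (List.mem_cons_of_mem _ ht') hp'
      · rw [if_pos (by simp [hv])]
        constructor
        · intro h; exact absurd h (by simp)
        · intro h
          exact absurd (h t (by simp) (by omega)) hv

theorem bLoop_none (s : List Char) (l : List (List Char)) :
    bLoop s l none = true ↔
      ∀ t ∈ l, ∀ t' ∈ l, 0 < bCount s t → 0 < bCount s t' → bCount s t = bCount s t' := by
  induction l with
  | nil => simp [bLoop]
  | cons t rest ih =>
    by_cases hp : bCount s t ≤ 0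
    · simp only [bLoop, if_pos hp]
      rw [ih]
      constructor
      · intro h t1 h1 t2 h2 hp1 hp2
        rcases List.mem_cons.mp h1 with rfl | h1'
        · omega
        rcases List.mem_cons.mp h2 with rfl | h2'
        · omega
        exact h t1 h1' t2 h2' hp1 hp2
      · intro h t1 h1 t2 h2 hp1 hp2
        exact h t1 (List.mem_cons_of_mem _ h1) t2 (List.mem_cons_of_mem _ h2) hp1 hp2
    · simp only [bLoop, if_neg hp]
      rw [bLoop_some]
      constructor
      · intro h t1 h1 t2 h2 hp1 hp2
        rcases List.mem_cons.mp h1 with rfl | h1' <;> rcases List.mem_cons.mp h2 with rfl | h2'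
        · rfl
        · exact (h t2 h2' hp2).symm
        · exact h t1 h1' hp1
        · exact (h t1 h1' hp1).trans (h t2 h2' hp2).symm
      · intro h t1 h1 hp1
        exact h t1 (List.mem_cons_of_mem _ h1) t (by simp) hp1 (by omega)

theorem main_equiv (str : String) : is_counts_equal str = is_counts_equal_alt str := by
  set s := str.toList with hs
  have hOK := dictOK_final s
  obtain ⟨hnd, H⟩ := hOK
  set D := s.foldl (fun d c => aInner c d) (PySem.Dict.insert PySem.Dict.empty [] 1) with hD
  -- membership characterization of A's items
  have hitems : ∀ kv : List Char × Int, kv ∈ PySem.Dict.items D ↔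
      (kv.1.Nodup ∧ 0 < numSub s kv.1 ∧ kv.2 = numSub s kv.1) := by
    intro ⟨k, v⟩
    rw [← PySem.Dict.get?_eq_some_iff_mem_items (d := D) (hnd := hnd), H k]
    constructor
    · intro h
      by_cases hc : k.Nodup ∧ 0 < numSub s k
      · rw [if_pos hc] at h
        exact ⟨hc.1, hc.2, (Option.some.injEq _ _ ▸ h).symm⟩
      · rw [if_neg hc] at h; simp at h
    · rintro ⟨h1, h2, h3⟩
      rw [if_pos ⟨h1, h2⟩]
      simp only at h3
      rw [h3]
  -- targets in B's enumeration
  have hperm : ∀ t : List Char, t ∈ bPerms 5 (bDistinct s) ↔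
      (t.length = 5 ∧ t.Nodup ∧ ∀ x ∈ t, x ∈ bDistinct s) :=
    fun t => mem_bPerms 5 (bDistinct s) t (bDistinct_nodup s)
  rw [Bool.eq_iff_iff]
  unfold is_counts_equal is_counts_equal_alt
  rw [← hs, ← hD]
  show _ ↔ bLoop s (bPerms 5 (bDistinct s)) none = true
  rw [aCheck_none, bLoop_none]
  constructor
  · intro h t1 h1 t2 h2 hp1 hp2
    obtain ⟨hl1, hn1, -⟩ := (hperm t1).mp h1
    obtain ⟨hl2, hn2, -⟩ := (hperm t2).mp h2
    rw [bCount_eq s t1 hl1] at hp1 ⊢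
    rw [bCount_eq s t2 hl2] at hp2 ⊢
    exact h (t1, numSub s t1) ((hitems _).mpr ⟨hn1, hp1, rfl⟩)
      (t2, numSub s t2) ((hitems _).mpr ⟨hn2, hp2, rfl⟩) hl1 hl2
  · intro h kv hkv kv' hkv' h5 h5'
    obtain ⟨h1, h2, h3⟩ := (hitems kv).mp hkv
    obtain ⟨h1', h2', h3'⟩ := (hitems kv').mp hkv'
    have hm : kv.1 ∈ bPerms 5 (bDistinct s) := (hperm kv.1).mpr
      ⟨h5, h1, fun x hx => (mem_bDistinct s x).mpr (numSub_mem s kv.1 h2 x hx)⟩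
    have hm' : kv'.1 ∈ bPerms 5 (bDistinct s) := (hperm kv'.1).mpr
      ⟨h5', h1', fun x hx => (mem_bDistinct s x).mpr (numSub_mem s kv'.1 h2' x hx)⟩
    have := h kv.1 hm kv'.1 hm'
    rw [bCount_eq s kv.1 h5, bCount_eq s kv'.1 h5'] at this
    rw [h3, h3']
    exact this h2 h2'

-- ===== VERDICT (by name: the statement is the Claim_ definition above) =====
theorem is_counts_equal_spec : Claim_equal_is_counts_equal := by
  intro str _
  unfold Spec_is_counts_equal
  exact main_equiv str
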